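-- pv_equiv track=rewrite | github.com/Eureka27/cch-redis-session-puller | src/session_events.py | is_sse_text
-- ===== SOURCE A (Python) =====
-- def is_sse_text(text: str) -> bool:
--     start = 0
--     length = len(text)
--     i = 0
--     while i <= length:
--         if i != length and text[i] != "\n":
--             i += 1
--             continue
--         line = text[start:i].strip()
--         start = i + 1
--         if not line:
--             i += 1
--             continue
--         if line.startswith(":"):
--             i += 1
--             continue
--         return line.startswith("event:") or line.startswith("data:")
--     return False
-- ===== SOURCE B (Python) =====
-- def is_sse_text(text: str) -> bool:
--     for line in text.split("\n"):
--         s = line.strip()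
--         if not s or s.startswith(":"):
--             continue
--         return s.startswith("event:") or s.startswith("data:")
--     return False
-- ===== Notes on version B (the rewrite author's own statement) =====
-- stated objective: idiomatic
-- what changed: Replaces the manual character-cursor scan with index bookkeeping and slicing by a direct iteration over the list of lines obtained by splitting the text on newlines.
import Mathlib
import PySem

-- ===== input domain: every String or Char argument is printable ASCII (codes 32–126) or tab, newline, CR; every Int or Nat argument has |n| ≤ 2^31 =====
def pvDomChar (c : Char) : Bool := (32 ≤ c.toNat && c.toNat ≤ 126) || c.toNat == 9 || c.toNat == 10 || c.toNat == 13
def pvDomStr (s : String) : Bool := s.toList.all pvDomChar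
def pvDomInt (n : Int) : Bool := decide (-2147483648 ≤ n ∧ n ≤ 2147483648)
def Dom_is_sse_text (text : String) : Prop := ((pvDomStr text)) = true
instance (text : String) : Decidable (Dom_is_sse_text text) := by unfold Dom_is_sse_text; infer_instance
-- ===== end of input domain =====

-- B iterates over text.split("\n") instead of A's manual character-cursor scan; objective: idiomatic (same O(n) cost).

-- ===== PORT A =====
-- A's while loop: cursor i over the characters, start = index just after the last newline.
def isSseLoopA (cs : List Char) (start i : Nat) : Bool :=
  if i ≤ cs.length then
    if i ≠ cs.length ∧ cs.getD i '\n' ≠ '\n' then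
      isSseLoopA cs start (i + 1)
    else
      let line := PySem.Chars.strip (PySem.List.slice cs (some (start : Int)) (some (i : Int)))
      if line = [] then isSseLoopA cs (i + 1) (i + 1)
      else if PySem.Chars.startswith line [':'] then isSseLoopA cs (i + 1) (i + 1)
      else PySem.Chars.startswith line "event:".toList || PySem.Chars.startswith line "data:".toList
  else false
termination_by cs.length + 1 - i

def is_sse_text (text : String) : Bool :=
  isSseLoopA text.toList 0 0

-- ===== PORT B =====
-- B's for loop over the list of lines produced by text.split("\n").
def isSseLinesB : List (List Char) → Bool
  | [] => false
  | l :: ls =>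
    let s := PySem.Chars.strip l
    if s = [] || PySem.Chars.startswith s [':'] then isSseLinesB ls
    else PySem.Chars.startswith s "event:".toList || PySem.Chars.startswith s "data:".toList

def is_sse_text_alt (text : String) : Bool :=
  isSseLinesB (PySem.Chars.splitOn text.toList ['\n'])

-- ===== PRECONDITION & SPEC =====
def Spec_is_sse_text (text : String) (out : Bool) : Prop := out = is_sse_text_alt text
instance (text : String) (out : Bool) : Decidable (Spec_is_sse_text text out) := by unfold Spec_is_sse_text; infer_instance

-- ===== CLAIM (what is proved, stated in full; the proofs are below) =====
def Claim_equal_is_sse_text : Prop := ∀ (text : String), Dom_is_sse_text text → Spec_is_sse_text text (is_sse_text text)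

-- ===== LEMMAS AND PROOFS =====

-- reference splitter: split a char list at each '\n' (result is never empty)
def pvSegs : List Char → List (List Char)
  | [] => [[]]
  | c :: r => if c = '\n' then [] :: pvSegs r
              else match pvSegs r with
                   | s :: ss => (c :: s) :: ss
                   | [] => [[c]]

lemma pvSegs_ne_nil (l : List Char) : pvSegs l ≠ [] := by
  cases l with
  | nil => simp [pvSegs]
  | cons c r =>
    simp only [pvSegs]
    split
    · simp
    · split <;> simp

lemma go_nil (fuel : Nat) (cur : List Char) (acc : List (List Char)) :
    PySem.Chars.splitOn.go ['\n'] (fuel + 1) [] cur acc = (cur.reverse :: acc).reverse := by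
  simp [PySem.Chars.splitOn.go]

lemma go_nl (fuel : Nat) (l cur : List Char) (acc : List (List Char)) :
    PySem.Chars.splitOn.go ['\n'] (fuel + 1) ('\n' :: l) cur acc
      = PySem.Chars.splitOn.go ['\n'] fuel l [] (cur.reverse :: acc) := by
  simp [PySem.Chars.splitOn.go, List.isPrefixOf]

lemma go_ne (fuel : Nat) (c : Char) (l cur : List Char) (acc : List (List Char)) (h : c ≠ '\n') :
    PySem.Chars.splitOn.go ['\n'] (fuel + 1) (c :: l) cur acc
      = PySem.Chars.splitOn.go ['\n'] fuel l (c :: cur) acc := by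
  simp [PySem.Chars.splitOn.go, List.isPrefixOf, (Ne.symm h)]

lemma go_spec (l : List Char) : ∀ (fuel : Nat) (cur : List Char) (acc : List (List Char)),
    l.length + 1 ≤ fuel →
    PySem.Chars.splitOn.go ['\n'] fuel l cur acc
      = acc.reverse ++ (pvSegs l).modifyHead (cur.reverse ++ ·) := by
  induction l with
  | nil =>
    intro fuel cur acc hf
    obtain ⟨f, rfl⟩ : ∃ f, fuel = f + 1 := ⟨fuel - 1, by omega⟩
    simp [go_nil, pvSegs, List.modifyHead]
  | cons c r ih =>
    intro fuel cur acc hf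
    obtain ⟨f, rfl⟩ : ∃ f, fuel = f + 1 := ⟨fuel - 1, by omega⟩
    obtain ⟨s, ss, hseg⟩ : ∃ s ss, pvSegs r = s :: ss := by
      cases h : pvSegs r with
      | nil => exact absurd h (pvSegs_ne_nil r)
      | cons s ss => exact ⟨s, ss, rfl⟩
    by_cases hc : c = '\n'
    · subst hc
      rw [go_nl, ih f [] (cur.reverse :: acc) (by simpa using hf)]
      simp [pvSegs, hseg, List.modifyHead]
    · rw [go_ne _ _ _ _ _ hc, ih f (c :: cur) acc (by simpa using hf)]
      simp [pvSegs, hc, hseg, List.modifyHead]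

lemma splitOn_eq_pvSegs (l : List Char) : PySem.Chars.splitOn l ['\n'] = pvSegs l := by
  rw [PySem.Chars.splitOn, go_spec l (l.length + 1) [] [] (by omega)]
  obtain ⟨s, ss, hseg⟩ : ∃ s ss, pvSegs l = s :: ss := by
    cases h : pvSegs l with
    | nil => exact absurd h (pvSegs_ne_nil l)
    | cons s ss => exact ⟨s, ss, rfl⟩
  simp [hseg, List.modifyHead]

lemma pvSegs_no_nl (l : List Char) (h : '\n' ∉ l) : pvSegs l = [l] := by
  induction l with
  | nil => simp [pvSegs]
  | cons c r ih =>
    simp only [List.mem_cons, not_or] at h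
    simp [pvSegs, Ne.symm h.1, ih h.2]

lemma pvSegs_append (l₁ l₂ : List Char) (h : '\n' ∉ l₁) :
    pvSegs (l₁ ++ '\n' :: l₂) = l₁ :: pvSegs l₂ := by
  induction l₁ with
  | nil => simp [pvSegs]
  | cons c r ih =>
    simp only [List.mem_cons, not_or] at h
    simp [pvSegs, Ne.symm h.1, ih h.2]

lemma loopA_end (cs : List Char) (start : Nat) (_hs : start ≤ cs.length)
    (hnl : '\n' ∉ cs.drop start) :
    isSseLoopA cs start cs.length = isSseLinesB (pvSegs (cs.drop start)) := by
  rw [pvSegs_no_nl _ hnl]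
  rw [isSseLoopA]
  have hslice : PySem.List.slice cs (some (start : Int)) (some (cs.length : Int))
      = cs.drop start := by
    rw [PySem.List.slice_natCast]
    exact List.take_of_length_le (by simp)
  have hfalse : isSseLoopA cs (cs.length + 1) (cs.length + 1) = false := by
    rw [isSseLoopA]; simp
  simp only [le_refl, if_true, ne_eq, not_true_eq_false, false_and, if_false, hslice, hfalse,
    isSseLinesB]
  split_ifs with h1 h2 <;> simp_all

lemma loopA_eq (cs : List Char) : ∀ (n start i : Nat), cs.length - i ≤ n → start ≤ i →
    i ≤ cs.length → '\n' ∉ (cs.drop start).take (i - start) →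
    isSseLoopA cs start i = isSseLinesB (pvSegs (cs.drop start)) := by
  intro n
  induction n with
  | zero =>
    intro start i hn hsi hil hnl
    have hi : i = cs.length := by omega
    subst hi
    refine loopA_end cs start hsi ?_
    rwa [List.take_of_length_le (by simp)] at hnl
  | succ n ih =>
    intro start i hn hsi hil hnl
    by_cases him : i = cs.length
    · subst him
      refine loopA_end cs start hsi ?_
      rwa [List.take_of_length_le (by simp)] at hnl
    · have hilt : i < cs.length := by omega
      by_cases hc : cs.getD i '\n' = '\n'
      · -- at a newline: close the current line and continue with start = i + 1
        have hgd : cs[i] = '\n' := by rwa [List.getD_eq_getElem cs '\n' hilt] at hc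
        have hdecomp : cs.drop start
            = (cs.drop start).take (i - start) ++ '\n' :: cs.drop (i + 1) := by
          conv_lhs => rw [← List.take_append_drop (i - start) (cs.drop start)]
          rw [List.drop_drop]
          have heq : start + (i - start) = i := by omega
          rw [heq, List.drop_eq_getElem_cons hilt, hgd]
        have hslice : PySem.List.slice cs (some (start : Int)) (some (i : Int))
            = (cs.drop start).take (i - start) := PySem.List.slice_natCast cs start i
        have hrest : isSseLoopA cs (i + 1) (i + 1)
            = isSseLinesB (pvSegs (cs.drop (i + 1))) :=
          ih (i + 1) (i + 1) (by omega) (by omega) (by omega) (by simp)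
        rw [isSseLoopA]
        conv_rhs => rw [hdecomp]
        rw [pvSegs_append _ _ hnl]
        rw [if_pos hil, if_neg (fun h => h.2 hc)]
        rw [isSseLinesB]
        simp only [hslice]
        clear hdecomp
        split_ifs with h1 h2 <;> simp_all
      · -- ordinary character: advance the cursor
        have hstep : '\n' ∉ (cs.drop start).take (i + 1 - start) := by
          have h1 : i + 1 - start = (i - start) + 1 := by omega
          have h2 : (cs.drop start)[i - start]? = cs[i]? := by
            rw [List.getElem?_drop]
            congr 1
            omega
          rw [h1, List.take_add_one, h2, List.getElem?_eq_getElem hilt]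
          have hgd : cs[i] ≠ '\n' := by rwa [List.getD_eq_getElem cs '\n' hilt] at hc
          simp [hnl, Ne.symm hgd]
        rw [isSseLoopA]
        simp only [hil, if_true, him, hc, ne_eq, not_false_eq_true, and_self, if_true]
        exact ih start (i + 1) (by omega) (by omega) (by omega) hstep

-- ===== VERDICT (by name: the statement is the Claim_ definition above) =====
theorem is_sse_text_spec : Claim_equal_is_sse_text := by
  intro text _
  unfold Spec_is_sse_text is_sse_text is_sse_text_alt
  rw [splitOn_eq_pvSegs]
  have := loopA_eq text.toList text.toList.length 0 0 (by omega) (by omega) (by omega) (by simp)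
  simpa using this
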